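-- pv_equiv track=rewrite | github.com/lac-dcc/adlet | scripts/einsum.py | convert_einsum_string
-- ===== SOURCE A (Python) =====
-- def convert_einsum_string(einsum_string):
--     char_mapping = {}
--     new_string = []
--     valid_chars = [chr(c) for c in range(ord('a'), ord('z') + 1)] \
--             + [chr(c) for c in range(ord('A'), ord('Z') + 1)] + [',', '-', '>']
--     new_char = ord('a')
--     for c in einsum_string:
--         assert c != ' '
--         if c == ',' or c == '-' or c == '>':
--             new_string.append(c)
--             continue
--         if c in char_mapping:
--             new_string.append(char_mapping[c])
--             continue
--         char_mapping[c] = chr(new_char)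
--         new_string.append(char_mapping[c])
--         new_char += 1
--         if new_char == ord('z') + 1:
--             new_char = ord('A')
--         elif new_char == ord('Z') + 1:
--             assert all([ c in valid_chars for c in new_string]), "This expression has too many index variables!"
--     return ''.join(new_string)
-- ===== SOURCE B (Python) =====
-- def convert_einsum_string(einsum_string):
--     assert ' ' not in einsum_string
--     letters = 'abcdefghijklmnopqrstuvwxyz'
--     letters += letters.upper()
--     variables = sorted(set(einsum_string) - {',', '-', '>'}, key=einsum_string.index)
--     assert len(variables) <= len(letters), "This expression has too many index variables!"
--     return einsum_string.translate(str.maketrans(''.join(variables), letters[:len(variables)]))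
-- ===== Notes on version B (the rewrite author's own statement) =====
-- stated objective: idiomatic
-- what changed: A's single interleaved pass (dict + growing output list + stateful wrapping character counter with inline asserts) is replaced by the standard relabelling idiom: take the set of characters minus the separators, sort it by first occurrence (sorted(..., key=einsum_string.index)), check the 52-letter bound once, and translate the whole string with str.maketrans/str.translate; …
import Mathlib
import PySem

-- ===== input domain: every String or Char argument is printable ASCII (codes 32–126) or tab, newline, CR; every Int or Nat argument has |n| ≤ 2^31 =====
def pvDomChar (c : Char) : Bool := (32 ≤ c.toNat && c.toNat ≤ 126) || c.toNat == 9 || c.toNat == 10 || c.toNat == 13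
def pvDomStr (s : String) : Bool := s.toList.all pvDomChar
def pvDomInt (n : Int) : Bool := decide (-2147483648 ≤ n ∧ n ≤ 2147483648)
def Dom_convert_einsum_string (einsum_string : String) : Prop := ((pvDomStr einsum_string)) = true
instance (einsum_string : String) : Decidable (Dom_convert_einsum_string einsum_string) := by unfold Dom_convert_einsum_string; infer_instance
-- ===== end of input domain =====

-- B replaces A's single stateful pass (dict + growing output list + wrapping character counter)
-- by the standard relabelling idiom: set minus separators, sorted by first occurrence, one
-- bound check, then translate the string through the resulting table (objective: idiomatic).

-- ===== PORT A =====

def pvSep (c : Char) : Bool := c == ',' || c == '-' || c == '>'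

-- one loop iteration of A: state = (char_mapping, new_string, new_char)
def pvStepA : (PySem.Dict Char Char × List Char × Int) → Char → (PySem.Dict Char Char × List Char × Int)
  | (m, ns, nc), c =>
    -- `assert c != ' '` raises exactly when c = ' '; those inputs are excluded by Pre_ (no-op where A returns)
    if pvSep c then (m, ns ++ [c], nc)
    else
      match m.get? c with
      | some v => (m, ns ++ [v], nc)
      | none =>
        let v := Char.ofNat nc.toNat
        let nc' := nc + 1
        let nc'' := if nc' = 123 then (65 : Int) else nc'
        -- `elif new_char == ord('Z')+1: assert all(...)`: within Pre_ (≤ 52 distinct index chars)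
        -- every emitted label is a plain letter, so this assert never fires; no-op on Pre_
        (m.insert c v, ns ++ [v], nc'')

def convert_einsum_string (einsum_string : String) : String :=
  String.ofList (einsum_string.toList.foldl pvStepA (PySem.Dict.empty, ([] : List Char), (97 : Int))).2.1

-- ===== PORT B =====

-- letters = 'abcdefghijklmnopqrstuvwxyz'; letters += letters.upper()
def pvBLower : List Char := "abcdefghijklmnopqrstuvwxyz".toList
def pvBLetters : List Char := pvBLower ++ PySem.Chars.upper pvBLower

def convert_einsum_string_alt (einsum_string : String) : String :=
  let cs := einsum_string.toList
  -- assert ' ' not in einsum_string : raises exactly outside Pre_ (no-op where B returns)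
  -- sorted(set(einsum_string) - {',', '-', '>'}, key=einsum_string.index); the sort key
  -- einsum_string.index(c) is ported as PySem.Chars.find cs [c] — exact, since every element
  -- of the set occurs in einsum_string, where str.index and str.find agree
  let varlist := PySem.List.sorted
    (PySem.Set.diff (PySem.Set.ofList cs) [',', '-', '>'])
    (fun c => PySem.Chars.find cs [c]) false
  -- assert len(variables) <= len(letters) : raises exactly outside Pre_ (no-op where B returns)
  -- str.maketrans(''.join(variables), letters[:len(variables)]) is the dict of the zip, and
  -- s.translate(table) maps each char through the table with identity default — exact for 1-char keys
  let table : PySem.Dict Char Char := PySem.Dict.ofList (varlist.zip (pvBLetters.take varlist.length))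
  String.ofList (cs.map (fun c => table.getD c c))

-- ===== PRECONDITION & SPEC =====
-- Pre_ excludes (a) strings containing a space, on which A raises AssertionError, and
-- (b) strings with more than 52 distinct non-separator characters, on which A's counter has
-- overflowed past 'Z' into punctuation labels while B's natural bound assert raises.
def Pre_convert_einsum_string (einsum_string : String) : Prop :=
  (' ' : Char) ∉ einsum_string.toList ∧
  (PySem.List.dedup (einsum_string.toList.filter
      (fun c => !(c == ',' || c == '-' || c == '>')))).length ≤ 52
instance (einsum_string : String) : Decidable (Pre_convert_einsum_string einsum_string) := by unfold Pre_convert_einsum_string; infer_instance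
def pvWitness_convert_einsum_string : String := "ij,jk->ik"

def Spec_convert_einsum_string (einsum_string : String) (out : String) : Prop := out = convert_einsum_string_alt einsum_string
instance (einsum_string : String) (out : String) : Decidable (Spec_convert_einsum_string einsum_string out) := by unfold Spec_convert_einsum_string; infer_instance

-- ===== CLAIM (what is proved, stated in full; the proofs are below) =====
def Claim_equal_convert_einsum_string : Prop := ∀ (einsum_string : String), Dom_convert_einsum_string einsum_string → Pre_convert_einsum_string einsum_string → Spec_convert_einsum_string einsum_string (convert_einsum_string einsum_string)

-- ===== LEMMAS AND PROOFS =====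

-- B's ordered list of distinct index characters, in first-occurrence order
def pvOrder (cs : List Char) : List Char :=
  PySem.List.dedup (cs.filter (fun c => !pvSep c))

-- the label A's counter gives the i-th distinct index character
def pvLabel (i : Int) : Char :=
  if i < 26 then Char.ofNat (97 + i).toNat else Char.ofNat (65 + PySem.Int.mod (i - 26) 58).toNat

def pvTable (order : List Char) : PySem.Dict Char Char :=
  (PySem.List.enumerate order).foldl (fun d p => d.insert p.2 (pvLabel p.1)) PySem.Dict.empty

-- A's counter value after k distinct index characters have been labelled
def pvCnt (k : Nat) : Int :=
  if (k : Int) < 26 then 97 + k else 65 + PySem.Int.mod ((k : Int) - 26) 58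

lemma pvLabel_cnt (k : Nat) : Char.ofNat (pvCnt k).toNat = pvLabel (k : Int) := by
  unfold pvCnt pvLabel
  split_ifs <;> rfl

lemma pvCnt_step (k : Nat) :
    (if pvCnt k + 1 = 123 then (65 : Int) else pvCnt k + 1) = pvCnt (k + 1) := by
  unfold pvCnt
  rw [PySem.Int.mod_eq_emod_of_pos (by norm_num), PySem.Int.mod_eq_emod_of_pos (by norm_num)]
  split_ifs <;> omega

lemma pvOrder_not_sep {cs : List Char} {x : Char} (h : x ∈ pvOrder cs) : pvSep x = false := by
  unfold pvOrder at h
  rw [PySem.List.mem_dedup] at h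
  simpa using (List.mem_filter.mp h).2

lemma pvOrder_append_sep (cs : List Char) (c : Char) (h : pvSep c = true) :
    pvOrder (cs ++ [c]) = pvOrder cs := by
  unfold pvOrder
  rw [List.filter_append]
  simp [h]

lemma pvOrder_append_nonsep (cs : List Char) (c : Char) (h : pvSep c = false) :
    pvOrder (cs ++ [c]) = PySem.Set.add (pvOrder cs) c := by
  unfold pvOrder
  rw [List.filter_append]
  simp only [PySem.List.dedup_eq_ofList, PySem.Set.ofList_eq_foldl, List.foldl_append]
  simp [h]

lemma pvTable_append (o : List Char) (c : Char) :
    pvTable (o ++ [c]) = (pvTable o).insert c (pvLabel (o.length : Int)) := by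
  unfold pvTable
  rw [PySem.List.enumerate_append, List.foldl_append]
  simp [PySem.List.enumerate_cons, PySem.List.enumerate_nil]

lemma pvTable_get?_none {o : List Char} {c : Char} (h : c ∉ o) :
    (pvTable o).get? c = none := by
  induction o using List.reverseRecOn with
  | nil => rfl
  | append_singleton o x ih =>
    rw [pvTable_append]
    rw [PySem.Dict.get?_insert_of_ne _ _ (by simp at h; exact fun hx => h.2 hx)]
    exact ih (fun hc => h (List.mem_append_left _ hc))

lemma pvTable_get?_isSome {o : List Char} {c : Char} (h : c ∈ o) :
    ((pvTable o).get? c).isSome := by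
  induction o using List.reverseRecOn with
  | nil => simp at h
  | append_singleton o x ih =>
    rw [pvTable_append]
    by_cases hx : c = x
    · subst hx; rw [PySem.Dict.get?_insert_self]; rfl
    · rw [PySem.Dict.get?_insert_of_ne _ _ hx]
      exact ih (by simpa [hx] using h)

-- loop invariant: A's fold state after cs is determined by the order/table of cs
lemma pvInv (cs : List Char) :
    cs.foldl pvStepA (PySem.Dict.empty, ([] : List Char), (97 : Int)) =
      (pvTable (pvOrder cs),
       cs.map (fun c => (pvTable (pvOrder cs)).getD c c),
       pvCnt (pvOrder cs).length) := by
  induction cs using List.reverseRecOn with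
  | nil => simp [pvOrder, pvTable, pvCnt]
  | append_singleton cs c ih =>
    rw [List.foldl_append, ih, List.foldl_cons, List.foldl_nil]
    by_cases hsep : pvSep c = true
    · -- separator: copied verbatim, order unchanged
      have hord := pvOrder_append_sep cs c hsep
      have hc : (pvTable (pvOrder cs)).getD c c = c :=
        PySem.Dict.getD_of_get?_eq_none _ _
          (pvTable_get?_none (fun hm => by simp [pvOrder_not_sep hm] at hsep))
      simp [pvStepA, hsep, hord, hc]
    · have hsep' : pvSep c = false := by simpa using hsep
      by_cases hmem : c ∈ pvOrder cs
      · -- already-seen index char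
        have hord : pvOrder (cs ++ [c]) = pvOrder cs := by
          rw [pvOrder_append_nonsep cs c hsep', PySem.Set.add]
          simp [hmem]
        obtain ⟨v, hv⟩ := Option.isSome_iff_exists.mp (pvTable_get?_isSome hmem)
        have hg : (pvTable (pvOrder cs)).getD c c = v :=
          PySem.Dict.getD_of_get?_eq_some _ _ hv
        simp [pvStepA, hsep', hv, hord, hg]
      · -- fresh index char
        have hord : pvOrder (cs ++ [c]) = pvOrder cs ++ [c] := by
          rw [pvOrder_append_nonsep cs c hsep', PySem.Set.add]
          simp [hmem]
        have hnone := pvTable_get?_none hmem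
        have hcs : ∀ x ∈ cs, x ≠ c := by
          intro x hx hxc
          subst hxc
          exact hmem (by
            unfold pvOrder
            rw [PySem.List.mem_dedup, List.mem_filter]
            exact ⟨hx, by simp [hsep']⟩)
        simp only [pvStepA, hsep', Bool.false_eq_true, if_false, hnone]
        rw [hord, pvTable_append]
        refine Prod.ext ?_ (Prod.ext ?_ ?_)
        · simp [pvLabel_cnt]
        · simp only [List.map_append, List.map_cons, List.map_nil]
          congr 1
          · exact List.map_congr_left (fun x hx => by
              rw [PySem.Dict.getD_insert_of_ne _ _ _ (hcs x hx)])
          · rw [PySem.Dict.getD_insert_self, pvLabel_cnt]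
        · simp [pvCnt_step]

-- ===== B-side lemmas =====

-- dedup commutes with a filter: B's "set minus separators" is the deduped filtered list
lemma pvFilter_dedup (p : Char → Bool) (cs : List Char) :
    (PySem.List.dedup cs).filter p = PySem.List.dedup (cs.filter p) := by
  induction cs using List.reverseRecOn with
  | nil => rfl
  | append_singleton cs x ih =>
    simp only [PySem.List.dedup_eq_ofList] at *
    rw [List.filter_append, PySem.Set.ofList_append_singleton]
    by_cases hm : x ∈ cs <;> by_cases hp : p x = true <;>
      simp [PySem.Set.add, PySem.Set.ofList_append_singleton, List.filter_append,
        hm, hp, ih]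

lemma pvContains_sep (c : Char) : PySem.Set.contains [',', '-', '>'] c = pvSep c := by
  unfold pvSep
  by_cases h1 : c = ',' <;> by_cases h2 : c = '-' <;> by_cases h3 : c = '>' <;>
    simp [PySem.Set.contains_eq_listContains, h1, h2, h3]

lemma pvDiff_eq_order (cs : List Char) :
    PySem.Set.diff (PySem.Set.ofList cs) [',', '-', '>'] = pvOrder cs := by
  show (PySem.Set.ofList cs).filter (fun x => !PySem.Set.contains [',', '-', '>'] x) = pvOrder cs
  rw [List.filter_congr (fun x _ => by rw [pvContains_sep])]
  rw [← PySem.List.dedup_eq_ofList, pvFilter_dedup]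
  rfl

-- single-char find on a cons, and find = idxOf for a present char
lemma pvGo_cons (c x : Char) (l : List Char) (i : Nat) :
    PySem.Chars.find.go [c] (x :: l) i = if x = c then (i : Int) else PySem.Chars.find.go [c] l (i + 1) := by
  rw [PySem.Chars.find.go]
  by_cases h : x = c
  · simp [List.isPrefixOf, h]
  · simp only [List.isPrefixOf, Bool.and_true]
    have : (c == x) = false := by simp [Ne.symm h]
    simp [this, h]

lemma pvGo_idxOf {c : Char} {l : List Char} (h : c ∈ l) (i : Nat) :
    PySem.Chars.find.go [c] l i = ((i + l.idxOf c : Nat) : Int) := by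
  induction l generalizing i with
  | nil => simp at h
  | cons x l ih =>
    rw [pvGo_cons]
    by_cases hx : x = c
    · simp [hx, List.idxOf_cons_self]
    · have hc : c ∈ l := by simpa [Ne.symm hx] using h
      rw [ih hc]
      rw [List.idxOf_cons_ne _ hx]
      push_cast
      simp [hx]
      ring

lemma pvFind_idxOf {c : Char} {l : List Char} (h : c ∈ l) :
    PySem.Chars.find l [c] = (l.idxOf c : Int) := by
  show PySem.Chars.find.go [c] l 0 = _
  rw [pvGo_idxOf h 0]
  simp

-- the distinct elements of cs, in first-occurrence order, have strictly increasing idxOf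
lemma pvOfList_pairwise_idxOf (cs : List Char) :
    (PySem.Set.ofList cs).Pairwise (fun a b => cs.idxOf a < cs.idxOf b) := by
  induction cs using List.reverseRecOn with
  | nil => simp
  | append_singleton cs x ih =>
    rw [PySem.Set.ofList_append_singleton]
    have hidx : ∀ a ∈ PySem.Set.ofList cs, (cs ++ [x]).idxOf a = cs.idxOf a := by
      intro a ha
      exact List.idxOf_append_of_mem ((PySem.Set.mem_ofList _ _).mp ha)
    by_cases hm : x ∈ cs
    · rw [PySem.Set.add, if_pos (by simpa [PySem.Set.contains_iff, PySem.Set.mem_ofList] using hm)]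
      exact List.Pairwise.imp_of_mem (fun ha hb h => by rw [hidx _ ha, hidx _ hb]; exact h) ih
    · rw [PySem.Set.add, if_neg (by simpa [PySem.Set.contains_iff, PySem.Set.mem_ofList] using hm)]
      rw [List.pairwise_append]
      refine ⟨List.Pairwise.imp_of_mem (fun ha hb h => by rw [hidx _ ha, hidx _ hb]; exact h) ih,
        List.pairwise_singleton _ _, ?_⟩
      intro a ha b hb
      rw [List.mem_singleton] at hb
      rw [hb, hidx _ ha]
      have h1 : cs.idxOf a < cs.length := List.idxOf_lt_length_of_mem ((PySem.Set.mem_ofList _ _).mp ha)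
      have h2 : (cs ++ [x]).idxOf x = cs.length := by
        simp [List.idxOf_append, hm]
      omega

lemma pvMem_order {cs : List Char} {a : Char} (h : a ∈ pvOrder cs) : a ∈ cs := by
  unfold pvOrder at h
  rw [PySem.List.mem_dedup] at h
  exact (List.mem_filter.mp h).1

-- B's sort (by first occurrence) leaves the first-occurrence-ordered list unchanged
lemma pvSorted_order (cs : List Char) :
    PySem.List.sorted (pvOrder cs) (fun c => PySem.Chars.find cs [c]) false = pvOrder cs := by
  apply PySem.List.sorted_eq_self_of_pairwise
  have hord : pvOrder cs = (PySem.Set.ofList cs).filter (fun c => !pvSep c) := by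
    rw [← PySem.List.dedup_eq_ofList, pvFilter_dedup]
    rfl
  have hp : (pvOrder cs).Pairwise (fun a b => cs.idxOf a < cs.idxOf b) := by
    rw [hord]
    exact (pvOfList_pairwise_idxOf cs).filter _
  refine List.Pairwise.imp_of_mem ?_ hp
  intro a b ha hb h
  rw [pvFind_idxOf (pvMem_order ha), pvFind_idxOf (pvMem_order hb)]
  exact_mod_cast Nat.le_of_lt h

-- B's letters agree with A's counter labels up to index 51
lemma pvLetters_all :
    (List.range 52).all (fun n => pvBLetters.getD n ' ' == pvLabel (n : Int)) = true := by decide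

lemma pvLetters_label (n : Nat) (h : n < 52) :
    pvBLetters.getD n ' ' = pvLabel (n : Int) := by
  exact beq_iff_eq.mp (List.all_eq_true.mp pvLetters_all n (List.mem_range.mpr h))

lemma pvDictOfList_append (l : List (Char × Char)) (c v : Char) :
    PySem.Dict.ofList (l ++ [(c, v)]) = (PySem.Dict.ofList l).insert c v := by
  simp [PySem.Dict.ofList, PySem.Dict.update, List.foldl_append]

-- B's zip table equals the label table, as long as at most 52 index characters occur
lemma pvZip_table (o : List Char) (hl : o.length ≤ 52) :
    PySem.Dict.ofList (o.zip (pvBLetters.take o.length)) = pvTable o := by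
  induction o using List.reverseRecOn with
  | nil => rfl
  | append_singleton o x ih =>
    have hlen : o.length < 52 := by
      have : (o ++ [x]).length = o.length + 1 := by simp
      omega
    have hL : o.length < pvBLetters.length := by
      have : pvBLetters.length = 52 := by decide
      omega
    have htake : pvBLetters.take (o.length + 1)
        = pvBLetters.take o.length ++ [pvBLetters.getD o.length ' '] := by
      rw [List.take_add_one]
      simp [List.getD, List.getElem?_eq_getElem hL]
    have hzip : (o ++ [x]).zip (pvBLetters.take (o.length + 1))
        = o.zip (pvBLetters.take o.length) ++ [(x, pvBLetters.getD o.length ' ')] := by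
      rw [htake, List.zip_append (by simp [Nat.le_of_lt hL])]
      simp
    rw [show (o ++ [x]).length = o.length + 1 by simp, hzip, pvDictOfList_append,
      pvTable_append, ih (Nat.le_of_lt hlen), pvLetters_label _ hlen]

theorem pvMain (s : String) (hpre : Pre_convert_einsum_string s) :
    convert_einsum_string s = convert_einsum_string_alt s := by
  obtain ⟨-, hlen⟩ := hpre
  have hlen' : (pvOrder s.toList).length ≤ 52 := by
    simpa [pvOrder, pvSep] using hlen
  have hnodup : (pvOrder s.toList).Nodup := by
    rw [pvOrder, PySem.List.dedup_eq_ofList]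
    exact PySem.Set.nodup_ofList _
  unfold convert_einsum_string convert_einsum_string_alt
  rw [pvInv]
  simp only
  rw [pvDiff_eq_order, pvSorted_order, pvZip_table _ hlen']

-- ===== VERDICT (by name: the statement is the Claim_ definition above) =====
theorem convert_einsum_string_spec : Claim_equal_convert_einsum_string := by
  intro s _ hpre
  exact pvMain s hpre
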